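-- pv_equiv track=rewrite | github.com/dmies/adventOfCode | day08.py | parse_image
-- ===== SOURCE A (Python) =====
-- def parse_image(picture_data, width, height):
--     rows = []
--     while len(picture_data) > 0:
--         row_data, picture_data = picture_data[:width], picture_data[width:]
--         row = []
--         for digit in row_data:
--             row.append(digit)
--         rows.append(row)
--     layers = []
--     while len(rows) > 0:
--         layer, rows = rows[:height], rows[height:]
--         layers.append(layer)
--     return layers
-- ===== SOURCE B (Python) =====
-- def parse_image(picture_data, width, height):
--     if not picture_data:
--         return []
--     layer_size = width * height
--     layer = [list(picture_data[r:r + width])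
--              for r in range(0, min(layer_size, len(picture_data)), width)]
--     return [layer] + parse_image(picture_data[layer_size:], width, height)
-- ===== Notes on version B (the rewrite author's own statement) =====
-- stated objective: alternative
-- what changed: B is recursive on the flat string, peeling one width*height layer per call and building that layer's rows with an index-range comprehension, instead of A's two sequential while-loop passes that first build the full intermediate list of all rows and then regroup it by height.
import Mathlib
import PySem

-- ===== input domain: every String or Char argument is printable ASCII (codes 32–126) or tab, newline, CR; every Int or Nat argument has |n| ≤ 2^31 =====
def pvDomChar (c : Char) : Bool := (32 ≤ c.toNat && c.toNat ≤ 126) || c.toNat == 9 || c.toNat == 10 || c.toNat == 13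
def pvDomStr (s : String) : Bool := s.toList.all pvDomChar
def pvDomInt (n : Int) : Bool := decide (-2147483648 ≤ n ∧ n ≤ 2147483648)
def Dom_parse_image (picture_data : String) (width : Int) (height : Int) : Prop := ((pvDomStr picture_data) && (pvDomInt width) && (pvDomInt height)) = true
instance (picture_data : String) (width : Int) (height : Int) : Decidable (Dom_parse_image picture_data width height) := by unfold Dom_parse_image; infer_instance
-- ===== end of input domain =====

-- B recurses on the flat string, peeling one width*height layer per call and building its rows
-- with an index-range comprehension, instead of A's two sequential while-loop passes through an
-- intermediate list of all rows; a different decomposition of the same O(n) task.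

-- ===== PORT A =====
-- first while loop: chop picture_data into width-sized rows (fuel = length+1 bounds the loop;
-- within Pre_ each iteration strictly shrinks the string, so the fuel is never exhausted)
def pvRowsA : Nat → List Char → Int → List (List String)
  | 0, _, _ => []
  | fuel+1, s, width =>
    if s.length > 0 then
      let row_data := PySem.List.slice s none (some width)
      let rest := PySem.List.slice s (some width) none
      (row_data.foldl (fun row digit => row ++ [String.mk [digit]]) []) :: pvRowsA fuel rest width
    else []

-- second while loop: group the rows into height-sized layers
def pvLayersA : Nat → List (List String) → Int → List (List (List String))
  | 0, _, _ => []
  | fuel+1, rows, height =>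
    if rows.length > 0 then
      PySem.List.slice rows none (some height) :: pvLayersA fuel (PySem.List.slice rows (some height) none) height
    else []

def parse_image (picture_data : String) (width : Int) (height : Int) : List (List (List String)) :=
  let s := picture_data.toList
  let rows := pvRowsA (s.length + 1) s width
  pvLayersA (rows.length + 1) rows height

-- ===== PORT B =====
-- Source B's recursion: 'if not picture_data: return []', one layer built by the comprehension
-- '[list(picture_data[r:r+width]) for r in range(0, min(layer_size, len(picture_data)), width)]',
-- then recurse on picture_data[layer_size:].  Fuel = length+1: within Pre_ each call strictly
-- shrinks the string by layer_size ≥ 1, so the fuel is never exhausted.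
def pvParseB : Nat → List Char → Int → Int → List (List (List String))
  | 0, _, _, _ => []
  | fuel+1, s, width, layer_size =>
    if s = [] then []
    else
      (PySem.List.pyRange 0 (min layer_size (s.length : Int)) width).map
          (fun r => (PySem.List.slice s (some r) (some (r + width))).map (fun c => String.mk [c]))
        :: pvParseB fuel (PySem.List.slice s (some layer_size) none) width layer_size

def parse_image_alt (picture_data : String) (width : Int) (height : Int) : List (List (List String)) :=
  let s := picture_data.toList
  pvParseB (s.length + 1) s width (width * height)

-- ===== PRECONDITION & SPEC =====
-- Pre_ excludes nonempty picture_data with nonpositive width or height, on which A's slicing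
-- while-loops never shrink the data and A loops forever (returns nothing).
def Pre_parse_image (picture_data : String) (width : Int) (height : Int) : Prop :=
  picture_data = "" ∨ (1 ≤ width ∧ 1 ≤ height)
instance (picture_data : String) (width : Int) (height : Int) : Decidable (Pre_parse_image picture_data width height) := by unfold Pre_parse_image; infer_instance

def pvWitness_parse_image : String × Int × Int := ("123456789012", 3, 2)

def Spec_parse_image (picture_data : String) (width : Int) (height : Int) (out : List (List (List String))) : Prop := out = parse_image_alt picture_data width height
instance (picture_data : String) (width : Int) (height : Int) (out : List (List (List String))) : Decidable (Spec_parse_image picture_data width height out) := by unfold Spec_parse_image; infer_instance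

-- ===== CLAIM (what is proved, stated in full; the proofs are below) =====
def Claim_equal_parse_image : Prop := ∀ (picture_data : String) (width : Int) (height : Int), Dom_parse_image picture_data width height → Pre_parse_image picture_data width height → Spec_parse_image picture_data width height (parse_image picture_data width height)

-- ===== LEMMAS AND PROOFS =====

-- canonical chunking: split a list into pieces of size w (w ≥ 1 intended; written with w-1
-- so the recursion always consumes one element and terminates unconditionally)
def pvChunks {α : Type} (w : Nat) : List α → List (List α)
  | [] => []
  | a :: s => (a :: s.take (w-1)) :: pvChunks w (s.drop (w-1))
  termination_by l => l.length
  decreasing_by simp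

theorem pvChunks_nil {α : Type} (w : Nat) : pvChunks (α := α) w [] = [] := by
  rw [pvChunks]

theorem pvChunks_eq {α : Type} {w : Nat} (hw : 0 < w) (s : List α) (hs : s ≠ []) :
    pvChunks w s = s.take w :: pvChunks w (s.drop w) := by
  obtain ⟨a, t, rfl⟩ := List.exists_cons_of_ne_nil hs
  obtain ⟨m, rfl⟩ := Nat.exists_eq_add_of_lt hw
  rw [pvChunks]
  simp [List.take_succ_cons, List.drop_succ_cons]

theorem pvChunks_take_drop {α : Type} {w : Nat} (hw : 0 < w) :
    ∀ (h : Nat) (s : List α),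
      (pvChunks w s).take h = pvChunks w (s.take (w*h)) ∧
      (pvChunks w s).drop h = pvChunks w (s.drop (w*h)) := by
  intro h
  induction h with
  | zero => intro s; simp [pvChunks_nil]
  | succ n ih =>
    intro s
    by_cases hs : s = []
    · subst hs; simp [pvChunks_nil]
    · rw [pvChunks_eq hw s hs]
      have e : w*(n+1) = w*n + w := by ring
      have htne : s.take (w*(n+1)) ≠ [] := by
        simp [List.take_eq_nil_iff, hs]
        omega
      rw [pvChunks_eq hw _ htne]
      have h1 : (s.take (w*(n+1))).take w = s.take w := by
        rw [List.take_take]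
        congr 1
        omega
      have h2 : (s.take (w*(n+1))).drop w = (s.drop w).take (w*n) := by
        rw [List.drop_take]
        congr 1
        omega
      have h3 : s.drop (w*(n+1)) = (s.drop w).drop (w*n) := by
        rw [List.drop_drop]
        congr 1
        omega
      constructor
      · simp only [List.take_succ_cons, h1, h2]
        exact congrArg _ (ih (s.drop w)).1
      · simp only [List.drop_succ_cons, h3]
        exact (ih (s.drop w)).2

theorem pvChunks_map {α β : Type} {w : Nat} (hw : 0 < w) (g : α → β) :
    ∀ s : List α, pvChunks w (s.map g) = (pvChunks w s).map (List.map g) := by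
  intro s
  induction hn : s.length using Nat.strong_induction_on generalizing s with
  | _ n ih =>
    by_cases hs : s = []
    · subst hs; simp [pvChunks_nil]
    · rw [pvChunks_eq hw s hs, pvChunks_eq hw (s.map g) (by simp [hs]),
          ← List.map_take, ← List.map_drop]
      subst hn
      have hlt : (s.drop w).length < s.length := by
        simp
        have : 0 < s.length := List.length_pos_of_ne_nil hs
        omega
      rw [ih _ hlt (s.drop w) rfl]
      simp

theorem pvChunks_comp {α : Type} {w h : Nat} (hw : 0 < w) (hh : 0 < h) :
    ∀ s : List α, pvChunks h (pvChunks w s) = (pvChunks (w*h) s).map (pvChunks w) := by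
  intro s
  induction hn : s.length using Nat.strong_induction_on generalizing s with
  | _ n ih =>
    by_cases hs : s = []
    · subst hs; simp [pvChunks_nil]
    · have hwh : 0 < w*h := Nat.mul_pos hw hh
      have hrne : pvChunks w s ≠ [] := by
        rw [pvChunks_eq hw s hs]; simp
      rw [pvChunks_eq hh _ hrne, pvChunks_eq hwh s hs]
      rw [(pvChunks_take_drop hw h s).1, (pvChunks_take_drop hw h s).2]
      subst hn
      have hlt : (s.drop (w*h)).length < s.length := by
        simp
        have : 0 < s.length := List.length_pos_of_ne_nil hs
        omega
      rw [ih _ hlt (s.drop (w*h)) rfl]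
      simp

-- A's first loop computes the width-chunks, each row mapped to singleton strings
theorem pvRowsA_eq {w : Int} (hw : 1 ≤ w) :
    ∀ (fuel : Nat) (s : List Char), s.length < fuel →
      pvRowsA fuel s w = (pvChunks w.toNat s).map (List.map (fun c => String.mk [c])) := by
  intro fuel
  induction fuel with
  | zero => intro s h; omega
  | succ n ih =>
    intro s h
    by_cases hs : s = []
    · subst hs; simp [pvRowsA, pvChunks_nil]
    · have hlen : 0 < s.length := List.length_pos_of_ne_nil hs
      have hwn : 0 < w.toNat := by omega
      rw [pvChunks_eq hwn s hs]
      simp only [pvRowsA, if_pos hlen]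
      rw [PySem.List.slice_to s (by omega), PySem.List.slice_from s (by omega)]
      rw [ih (s.drop w.toNat) (by simp only [List.length_drop]; omega)]
      rw [PySem.List.foldl_append_singleton_eq_map (fun c => String.mk [c]) (s.take w.toNat) []]
      simp only [List.nil_append, List.map_cons]

-- A's second loop computes the height-chunks of the row list
theorem pvLayersA_eq {h : Int} (hh : 1 ≤ h) :
    ∀ (fuel : Nat) (rows : List (List String)), rows.length < fuel →
      pvLayersA fuel rows h = pvChunks h.toNat rows := by
  intro fuel
  induction fuel with
  | zero => intro rows hf; omega
  | succ n ih =>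
    intro rows hf
    by_cases hr : rows = []
    · subst hr; simp [pvLayersA, pvChunks_nil]
    · have hlen : 0 < rows.length := List.length_pos_of_ne_nil hr
      have hhn : 0 < h.toNat := by omega
      rw [pvChunks_eq hhn rows hr]
      simp only [pvLayersA, if_pos hlen]
      rw [PySem.List.slice_to rows (by omega), PySem.List.slice_from rows (by omega)]
      rw [ih (rows.drop h.toNat) (by simp only [List.length_drop]; omega)]

-- induction forms of pyRange for an arbitrary positive step
theorem pvPyRange_pos_nil {a b step : Int} (hs : 0 < step) (h : b ≤ a) :
    PySem.List.pyRange a b step = [] := by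
  rw [PySem.List.pyRange_of_pos a b hs, if_neg (by omega)]
  simp

theorem pvPyRange_pos_cons {a b step : Int} (hs : 0 < step) (h : a < b) :
    PySem.List.pyRange a b step = a :: PySem.List.pyRange (a + step) b step := by
  rw [PySem.List.pyRange_of_pos a b hs, PySem.List.pyRange_of_pos (a + step) b hs]
  have hq : (b - a + step - 1) / step = (b - a - 1) / step + 1 := by
    have h1 := Int.add_mul_ediv_right (b - a - 1) 1 (show step ≠ 0 by omega)
    calc (b - a + step - 1) / step = (b - a - 1 + 1 * step) / step := by ring_nf
    _ = (b - a - 1) / step + 1 := by rw [h1]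
  have hq0 : 0 ≤ (b - a - 1) / step := Int.ediv_nonneg (by omega) (by omega)
  rw [if_pos h, hq]
  have htn : ((b - a - 1) / step + 1).toNat = ((b - a - 1) / step).toNat + 1 := by omega
  rw [htn, List.range_succ_eq_map]
  simp only [List.map_cons, List.map_map]
  congr 1
  · simp
  by_cases hab : a + step < b
  · rw [if_pos hab]
    have : b - (a + step) + step - 1 = b - a - 1 := by ring
    rw [this]
    apply List.map_congr_left
    intro k _
    simp only [Function.comp]
    push_cast
    ring
  · rw [if_neg hab]
    have he : (b - a - 1) / step = 0 := Int.ediv_eq_zero_of_lt (by omega) (by omega)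
    rw [he]
    simp

-- B's comprehension over range(r, e, w) yields the width-chunks of the e-r characters from r,
-- provided w divides the span or the span reaches the end of the string
theorem pvRowRange_eq {w : Int} (hw : 1 ≤ w) (s : List Char) (e : Int) (he : e ≤ s.length) :
    ∀ (d : Nat) (r : Int), 0 ≤ r → (e - r).toNat ≤ d → (w ∣ (e - r) ∨ e = s.length) →
      (PySem.List.pyRange r e w).map
          (fun i => (PySem.List.slice s (some i) (some (i + w))).map (fun c => String.mk [c]))
        = (pvChunks w.toNat ((s.drop r.toNat).take (e - r).toNat)).map
            (List.map (fun c => String.mk [c])) := by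
  intro d
  induction d with
  | zero =>
    intro r hr hd _
    have hre : e ≤ r := by omega
    rw [pvPyRange_pos_nil (by omega) hre]
    have : (e - r).toNat = 0 := by omega
    rw [this]
    simp [pvChunks_nil]
  | succ n ih =>
    intro r hr hd hinv
    by_cases hre : e ≤ r
    · rw [pvPyRange_pos_nil (by omega) hre]
      have : (e - r).toNat = 0 := by omega
      rw [this]
      simp [pvChunks_nil]
    · have hrlt : r < e := by omega
      rw [pvPyRange_pos_cons (by omega) hrlt]
      have hwn : 0 < w.toNat := by omega
      set c := (s.drop r.toNat).take (e - r).toNat with hc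
      have hlen_drop : (s.drop r.toNat).length = s.length - r.toNat := by simp
      have hclen : c.length = (e - r).toNat := by
        rw [hc, List.length_take, hlen_drop]
        omega
      have hcne : c ≠ [] := by
        intro hnil
        rw [hnil] at hclen
        simp at hclen
        omega
      rw [pvChunks_eq hwn c hcne]
      simp only [List.map_cons]
      congr 1
      · -- heads: s[r:r+w] as chars = c.take w
        rw [PySem.List.slice_toNat s hr (by omega)]
        have htn : (r + w).toNat - r.toNat = w.toNat := by omega
        rw [htn]
        congr 1
        rw [hc, List.take_take]
        rcases hinv with hdvd | hend
        · -- w divides e - r and 0 < e - r, so w ≤ e - r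
          have hwle : w ≤ e - r := by
            rcases hdvd with ⟨k, hk⟩
            have hk1 : 1 ≤ k := by nlinarith
            nlinarith
          congr 1
          omega
        · -- span reaches the end: both takes clamp to the whole remainder
          rcases le_or_gt w.toNat (e - r).toNat with hle | hgt
          · congr 1; omega
          · rw [List.take_of_length_le (by rw [hlen_drop]; omega),
                List.take_of_length_le (by rw [hlen_drop]; omega)]
      · -- tails: recurse at r+w
        have hr' : (0:Int) ≤ r + w := by omega
        have hd' : (e - (r + w)).toNat ≤ n := by omega
        have hinv' : (w ∣ (e - (r + w)) ∨ e = s.length) := by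
          rcases hinv with hdvd | hend
          · left
            have : e - (r + w) = (e - r) - w := by ring
            rw [this]
            exact dvd_sub hdvd dvd_rfl
          · right; exact hend
        rw [ih (r + w) hr' hd' hinv']
        have hdt : List.drop w.toNat c = List.take (e - (r + w)).toNat (List.drop (r + w).toNat s) := by
          rw [hc, List.drop_take, List.drop_drop]
          have e1 : (e - r).toNat - w.toNat = (e - (r + w)).toNat := by omega
          have e2 : r.toNat + w.toNat = (r + w).toNat := by omega
          rw [e1, e2]
        rw [hdt]

-- B's recursion computes the layer_size-chunks, each split by the comprehension
theorem pvParseB_eq {w h : Int} (hw : 1 ≤ w) (hh : 1 ≤ h) :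
    ∀ (fuel : Nat) (s : List Char), s.length < fuel →
      pvParseB fuel s w (w * h)
        = (pvChunks (w * h).toNat s).map
            (fun c => (pvChunks w.toNat c).map (List.map (fun ch => String.mk [ch]))) := by
  have hls : (1:Int) ≤ w * h := by nlinarith
  intro fuel
  induction fuel with
  | zero => intro s hf; omega
  | succ n ih =>
    intro s hf
    by_cases hs : s = []
    · subst hs; simp [pvParseB, pvChunks_nil]
    · have hlen : 0 < s.length := List.length_pos_of_ne_nil hs
      have hlsn : 0 < (w * h).toNat := by omega
      rw [pvChunks_eq hlsn s hs]
      simp only [pvParseB, if_neg hs, List.map_cons]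
      congr 1
      · -- the layer comprehension
        set e := min (w * h) (s.length : Int) with hee
        have he : e ≤ s.length := by omega
        have hinv : (w ∣ (e - 0) ∨ e = s.length) := by
          rcases le_or_gt (w * h) (s.length : Int) with hle | hgt
          · left
            have : e = w * h := by omega
            rw [this]
            simpa using Dvd.intro h rfl
          · right; omega
        rw [pvRowRange_eq hw s e he (e - 0).toNat 0 le_rfl le_rfl hinv]
        congr 2
        simp only [Int.sub_zero]
        rcases le_or_gt (w * h) (s.length : Int) with hle | hgt
        · congr 1; omega
        · have h1 : e.toNat = s.length := by omega
          simp only [h1, Int.toNat_zero, List.drop_zero]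
          rw [List.take_of_length_le le_rfl, List.take_of_length_le (by omega)]
      · -- the recursive tail
        rw [PySem.List.slice_from s (by omega)]
        exact ih (s.drop (w * h).toNat) (by simp only [List.length_drop]; omega)

-- ===== VERDICT (by name: the statement is the Claim_ definition above) =====
theorem parse_image_spec : Claim_equal_parse_image := by
  intro pd w h _ hpre
  unfold Spec_parse_image parse_image parse_image_alt
  rcases hpre with hempty | ⟨hw, hh⟩
  · subst hempty
    simp [pvRowsA, pvLayersA, pvParseB]
  · have hwn : 0 < w.toNat := by omega
    have hhn : 0 < h.toNat := by omega
    have hlsn : (w*h).toNat = w.toNat * h.toNat := by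
      rw [Int.toNat_mul (by omega) (by omega)]
    dsimp only
    rw [pvRowsA_eq hw _ pd.toList (by omega)]
    rw [pvLayersA_eq hh _ _ (by omega)]
    rw [pvParseB_eq hw hh _ pd.toList (by omega)]
    rw [pvChunks_map hhn (List.map (fun c => String.mk [c])) (pvChunks w.toNat pd.toList),
        pvChunks_comp hwn hhn pd.toList, hlsn]
    simp [List.map_map, Function.comp]
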